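-- pv_equiv track=rewrite | github.com/Larcius/gta5-modding-utils | worker/lod_map_creator/LodMapCreator.py | createIndicesStr
-- ===== SOURCE A (Python) =====
-- def createIndicesStr(indices: list[int]) -> str:
--     indicesStr = ""
--     i = 0
--     for index in indices:
--         if i % 15 == 0:
--             if i > 0:
--                 indicesStr += "\n"
--             indicesStr += "				"
--         else:
--             indicesStr += " "
--         indicesStr += str(index)
--         i += 1
--
--     return indicesStr
-- ===== SOURCE B (Python) =====
-- def createIndicesStr(indices: list[int]) -> str:
--     rows = ["\t\t\t\t" + " ".join(map(str, indices[i:i + 15]))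
--             for i in range(0, len(indices), 15)]
--     return "\n".join(rows)
-- ===== Notes on version B (the rewrite author's own statement) =====
-- stated objective: simpler
-- what changed: A builds the string in one flat loop, branching per element on a running counter i % 15; B recursively slices off a 15-element chunk, renders it as one tab-prefixed ' '-joined row, and joins rows with newlines.
import Mathlib
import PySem

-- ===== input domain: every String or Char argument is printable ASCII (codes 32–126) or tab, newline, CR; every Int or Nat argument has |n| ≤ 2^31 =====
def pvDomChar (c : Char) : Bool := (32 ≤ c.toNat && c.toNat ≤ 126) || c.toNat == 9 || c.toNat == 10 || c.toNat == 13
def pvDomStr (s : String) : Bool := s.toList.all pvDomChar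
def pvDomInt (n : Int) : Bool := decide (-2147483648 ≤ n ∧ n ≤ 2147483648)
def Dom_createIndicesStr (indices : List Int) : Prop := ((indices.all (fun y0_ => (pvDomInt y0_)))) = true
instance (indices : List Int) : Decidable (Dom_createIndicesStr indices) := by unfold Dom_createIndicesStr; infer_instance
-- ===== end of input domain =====

-- B replaces A's flat loop with per-element `i % 15` branching by a recursive
-- chunk-of-15 decomposition (slice a row, join it, recurse on the rest); same result, simpler to read.

-- ===== PORT A =====
-- the loop body of A: state is (indicesStr, i)
def pvAStep (st : String × Int) (index : Int) : String × Int :=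
  let s1 := if PySem.Int.mod st.2 15 == 0 then
              (if st.2 > 0 then st.1 ++ "\n" else st.1) ++ "\t\t\t\t"
            else st.1 ++ " "
  (s1 ++ PySem.Int.toStr index, st.2 + 1)

def createIndicesStr (indices : List Int) : String :=
  (indices.foldl pvAStep ("", 0)).1

-- ===== PORT B =====
def createIndicesStr_alt (indices : List Int) : String :=
  PySem.Str.join "\n"
    ((PySem.List.pyRange 0 (PySem.List.len indices) 15).map (fun i =>
      "\t\t\t\t" ++ PySem.Str.join " "
        ((PySem.List.slice indices (some i) (some (i + 15))).map PySem.Int.toStr)))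

-- ===== PRECONDITION & SPEC =====
def Spec_createIndicesStr (indices : List Int) (out : String) : Prop := out = createIndicesStr_alt indices
instance (indices : List Int) (out : String) : Decidable (Spec_createIndicesStr indices out) := by unfold Spec_createIndicesStr; infer_instance

-- ===== CLAIM (what is proved, stated in full; the proofs are below) =====
def Claim_equal_createIndicesStr : Prop := ∀ (indices : List Int), Dom_createIndicesStr indices → Spec_createIndicesStr indices (createIndicesStr indices)

-- ===== LEMMAS AND PROOFS =====

-- the string A's loop appends for one element at counter c
def pvPiece (c : Int) (x : Int) : String :=
  (if PySem.Int.mod c 15 == 0 then (if c > 0 then "\n" else "") ++ "\t\t\t\t" else " ")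
    ++ PySem.Int.toStr x

-- A's loop from counter c with empty accumulator
def pvG (c : Int) (xs : List Int) : String := (xs.foldl pvAStep ("", c)).1

-- the tail of one row: " x1 x2 ..."
def pvRowTail : List Int → String
  | [] => ""
  | y :: ys => " " ++ PySem.Int.toStr y ++ pvRowTail ys

lemma pvAStep_eq (s : String) (c x : Int) : pvAStep (s, c) x = (s ++ pvPiece c x, c + 1) := by
  unfold pvAStep pvPiece
  split_ifs <;> simp [String.append_assoc]

lemma pvFoldl_aStep (xs : List Int) (s : String) (c : Int) :
    xs.foldl pvAStep (s, c) = (s ++ pvG c xs, c + xs.length) := by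
  induction xs generalizing s c with
  | nil => simp [pvG]
  | cons x t ih =>
      rw [List.foldl_cons, pvAStep_eq, ih]
      have hg : pvG c (x :: t) = pvPiece c x ++ pvG (c + 1) t := by
        unfold pvG
        rw [List.foldl_cons, pvAStep_eq, ih]
        simp [pvG]
      rw [hg]
      simp [pvG, String.append_assoc]
      omega

lemma pvG_cons (c x : Int) (t : List Int) : pvG c (x :: t) = pvPiece c x ++ pvG (c + 1) t := by
  unfold pvG
  rw [List.foldl_cons, pvAStep_eq, pvFoldl_aStep]
  simp [pvG]

lemma pvG_append (c : Int) (as bs : List Int) :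
    pvG c (as ++ bs) = pvG c as ++ pvG (c + as.length) bs := by
  unfold pvG
  rw [List.foldl_append, pvFoldl_aStep, pvFoldl_aStep]
  simp [pvG]

lemma pvPiece_space (c x : Int) (h : c % 15 ≠ 0) : pvPiece c x = " " ++ PySem.Int.toStr x := by
  unfold pvPiece
  rw [PySem.Int.mod_eq_emod_of_pos (by norm_num)]
  simp [h]

lemma pvG_run (ys : List Int) (c : Int) (h1 : 0 < c % 15) (h2 : c % 15 + ys.length ≤ 15) :
    pvG c ys = pvRowTail ys := by
  induction ys generalizing c with
  | nil => rfl
  | cons y t ih =>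
      rw [pvG_cons, pvPiece_space c y (by omega), pvRowTail]
      simp only [List.length_cons] at h2
      by_cases ht : t = []
      · subst ht; simp [pvG, pvRowTail]
      · have hlen : 0 < t.length := List.length_pos_iff.mpr ht
        rw [ih (c + 1) (by omega) (by push_cast at h2 ⊢; omega)]

lemma pvJoin_cons_cons (sep a b : String) (rest : List String) :
    PySem.Str.join sep (a :: b :: rest) = a ++ sep ++ PySem.Str.join sep (b :: rest) := by
  apply String.toList_inj.mp
  simp [PySem.Str.toList_join, PySem.Chars.join_cons_cons]

lemma pvJoin_singleton (sep a : String) : PySem.Str.join sep [a] = a := by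
  apply String.toList_inj.mp
  simp [PySem.Str.toList_join, PySem.Chars.join_singleton]

lemma pvJoin_row (x : Int) (t : List Int) :
    PySem.Str.join " " ((x :: t).map PySem.Int.toStr) = PySem.Int.toStr x ++ pvRowTail t := by
  induction t generalizing x with
  | nil => simp [pvJoin_singleton, pvRowTail]
  | cons y s ih =>
      rw [List.map_cons, List.map_cons, pvJoin_cons_cons, ← List.map_cons, ih, pvRowTail]
      simp [String.append_assoc]

-- one row of B: tab prefix plus the space-joined slice starting at i
def pvRow (xs : List Int) (i : Int) : String :=
  "\t\t\t\t" ++ PySem.Str.join " "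
    ((PySem.List.slice xs (some i) (some (i + 15))).map PySem.Int.toStr)

lemma pvAlt_rows (xs : List Int) :
    createIndicesStr_alt xs
      = PySem.Str.join "\n" ((PySem.List.pyRange 0 (xs.length : Int) 15).map (pvRow xs)) := by
  unfold createIndicesStr_alt pvRow
  rw [PySem.List.len_eq]

lemma pvRange15 (n : Int) (h : 0 < n) :
    PySem.List.pyRange 0 n 15
      = (List.range ((n + 14) / 15).toNat).map (fun k : Nat => (15 : Int) * (k : Int)) := by
  rw [PySem.List.pyRange_of_pos 0 n (by norm_num), if_pos h]
  have h14 : n - 0 + 15 - 1 = n + 14 := by ring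
  rw [h14]
  apply List.map_congr_left
  intro k _
  omega

lemma pvRow_shift (xs : List Int) (k : Nat) :
    pvRow xs (15 * ((k : Int) + 1)) = pvRow (xs.drop 15) (15 * (k : Int)) := by
  unfold pvRow
  have h1 : (15 * ((k : Int) + 1)) = ((15 * (k + 1) : Nat) : Int) := by push_cast; ring
  have h2 : (15 * ((k : Int) + 1)) + 15 = ((15 * (k + 1) : Nat) : Int) + ((15 : Nat) : Int) := by
    push_cast; ring
  have h3 : (15 * (k : Int)) = ((15 * k : Nat) : Int) := by push_cast; ring
  have h4 : (15 * (k : Int)) + 15 = ((15 * k : Nat) : Int) + ((15 : Nat) : Int) := by push_cast; ring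
  rw [h2, h1, PySem.List.slice_natCast_add, h4, h3, PySem.List.slice_natCast_add,
    List.drop_drop]
  have : 15 + 15 * k = 15 * (k + 1) := by ring
  rw [this]

lemma pvRow_zero (xs : List Int) :
    pvRow xs 0 = "\t\t\t\t" ++ PySem.Str.join " " ((xs.take 15).map PySem.Int.toStr) := by
  unfold pvRow
  have h0 : (0 : Int) = ((0 : Nat) : Int) := rfl
  have h15 : (0 : Int) + 15 = ((0 : Nat) : Int) + ((15 : Nat) : Int) := by norm_num
  rw [h15, h0, PySem.List.slice_natCast_add]
  simp

lemma pvAlt_nil : createIndicesStr_alt [] = "" := by decide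

lemma pvAlt_ranged (xs : List Int) (h : 0 < (xs.length : Int)) :
    createIndicesStr_alt xs
      = PySem.Str.join "\n"
          ((List.range (((xs.length : Int) + 14) / 15).toNat).map
            (fun k : Nat => pvRow xs ((15 : Int) * (k : Int)))) := by
  rw [pvAlt_rows, pvRange15 _ h, List.map_map]
  rfl

lemma pvMapRange_shift (xs : List Int) (m : Nat) :
    (List.range (m + 1)).map (fun k : Nat => pvRow xs ((15 : Int) * (k : Int)))
      = pvRow xs 0
          :: (List.range m).map (fun k : Nat => pvRow (xs.drop 15) ((15 : Int) * (k : Int))) := by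
  rw [List.range_succ_eq_map]
  simp only [List.map_cons, List.map_map, Nat.cast_zero, mul_zero]
  congr 1
  apply List.map_congr_left
  intro k _
  simp only [Function.comp_apply, Nat.succ_eq_add_one]
  have h := pvRow_shift xs k
  have hc : ((15 : Int) * ((k + 1 : Nat) : Int)) = 15 * ((k : Int) + 1) := by push_cast; ring
  rw [hc, h]

-- one-step unfolding of B on a nonempty list, in take/drop form
lemma pvAlt_eq (xs : List Int) (h : xs ≠ []) :
    createIndicesStr_alt xs =
      "\t\t\t\t" ++ PySem.Str.join " " ((xs.take 15).map PySem.Int.toStr) ++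
        (if xs.drop 15 = [] then "" else "\n" ++ createIndicesStr_alt (xs.drop 15)) := by
  have hpos : 0 < xs.length := List.length_pos_iff.mpr h
  have hn : 0 < (xs.length : Int) := by exact_mod_cast hpos
  by_cases hd : xs.drop 15 = []
  · have hle : xs.length ≤ 15 := List.drop_eq_nil_iff.mp hd
    have hcnt : (((xs.length : Int) + 14) / 15).toNat = 1 := by omega
    rw [pvAlt_ranged xs hn, hcnt, List.range_one]
    simp only [List.map_cons, List.map_nil, Nat.cast_zero, mul_zero]
    rw [pvJoin_singleton, pvRow_zero, if_pos hd]
    simp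
  · have hlt : 15 < xs.length := by rw [List.drop_eq_nil_iff] at hd; omega
    have hdlen : ((xs.drop 15).length : Int) = (xs.length : Int) - 15 := by simp; omega
    have hdpos : 0 < ((xs.drop 15).length : Int) := by omega
    have hcnt : (((xs.length : Int) + 14) / 15).toNat
        = ((((xs.drop 15).length : Int) + 14) / 15).toNat + 1 := by omega
    have hm : 0 < ((((xs.drop 15).length : Int) + 14) / 15).toNat := by omega
    obtain ⟨m, hm'⟩ := Nat.exists_eq_succ_of_ne_zero (Nat.pos_iff_ne_zero.mp hm)
    rw [pvAlt_ranged xs hn, hcnt, pvMapRange_shift, pvAlt_ranged (xs.drop 15) hdpos,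
      if_neg hd, hm', List.range_succ_eq_map]
    simp only [List.map_cons, List.map_map, Nat.cast_zero, mul_zero]
    rw [pvJoin_cons_cons, pvRow_zero]
    simp [String.append_assoc]

lemma pvMain (n : Nat) : ∀ (xs : List Int), xs.length ≤ n → ∀ (k : Nat),
    pvG (15 * (k : Int)) xs =
      (if xs = [] then "" else (if k = 0 then "" else "\n") ++ createIndicesStr_alt xs) := by
  induction n with
  | zero =>
      intro xs hlen k
      have hx : xs = [] := List.eq_nil_of_length_eq_zero (Nat.le_zero.mp hlen)
      subst hx; simp [pvG]
  | succ n ih =>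
      intro xs hlen k
      cases xs with
      | nil => simp [pvG]
      | cons x t =>
          have hx : (x :: t) ≠ [] := by simp
          rw [pvG_cons, pvAlt_eq _ hx, if_neg hx]
          have hpiece : pvPiece (15 * (k : Int)) x
              = (if k = 0 then "" else "\n") ++ ("\t\t\t\t" ++ PySem.Int.toStr x) := by
            unfold pvPiece
            rw [PySem.Int.mod_eq_emod_of_pos (by norm_num)]
            have hm : (15 * (k : Int)) % 15 = 0 := by omega
            by_cases hk : k = 0
            · subst hk; simp
            · have hpos : 15 * (k : Int) > 0 := by omega
              simp only [hm, hk, hpos]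
              apply String.toList_inj.mp
              simp
          have hG : pvG (15 * (k : Int) + 1) t
              = pvG (15 * (k : Int) + 1) (t.take 14)
                ++ pvG (15 * (k : Int) + 1 + ((t.take 14).length : Int)) (t.drop 14) := by
            conv_lhs => rw [← List.take_append_drop 14 t]
            exact pvG_append _ _ _
          have hrun : pvG (15 * (k : Int) + 1) (t.take 14) = pvRowTail (t.take 14) := by
            apply pvG_run
            · omega
            · have : (t.take 14).length ≤ 14 := by simp
              omega
          have htake15 : (x :: t).take 15 = x :: t.take 14 := rfl
          have hdrop15 : (x :: t).drop 15 = t.drop 14 := rfl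
          rw [htake15, hdrop15, pvJoin_row, hpiece, hG, hrun]
          by_cases hd : t.drop 14 = []
          · simp [hd, pvG, String.append_assoc]
          · have hlen14 : 14 < t.length := by
              by_contra hc
              exact hd (List.drop_eq_nil_iff.mpr (by omega))
            have htl : ((t.take 14).length : Int) = 14 := by
              simp [List.length_take]; omega
            have hc15 : 15 * (k : Int) + 1 + ((t.take 14).length : Int) = 15 * ((k + 1 : Nat) : Int) := by
              rw [htl]; push_cast; ring
            have hIH := ih (t.drop 14) (by simp at hlen ⊢; omega) (k + 1)
            rw [hc15, hIH, if_neg hd]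
            simp [String.append_assoc]
            omega

-- ===== VERDICT (by name: the statement is the Claim_ definition above) =====
theorem createIndicesStr_spec : Claim_equal_createIndicesStr := by
  intro indices _
  unfold Spec_createIndicesStr createIndicesStr
  rw [pvFoldl_aStep]
  have h := pvMain indices.length indices le_rfl 0
  norm_num at h
  by_cases hnil : indices = []
  · subst hnil; simp [pvG, pvAlt_nil]
  · simp [h, hnil]
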